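-- pv_equiv track=rewrite | github.com/silvathg/gamerexpo | gamerexpo.py | estimate_cpu_tier
-- ===== SOURCE A (Python) =====
-- from typing import Any, Dict, List, Optional
--
-- def estimate_cpu_tier(cpu_name: str, threads: Optional[int]) -> str:
--     lower = cpu_name.lower()
--     threads = threads or 0
--
--     if any(k in lower for k in ("i9", "ryzen 9", "ultra 9")) or threads >= 20:
--         return "entusiasta"
--     if any(k in lower for k in ("i7", "ryzen 7", "ultra 7")) or threads >= 12:
--         return "alto"
--     if any(k in lower for k in ("i5", "ryzen 5", "ultra 5")) or threads >= 8:
--         return "intermediário"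
--     if any(k in lower for k in ("i3", "ryzen 3")) or threads >= 4:
--         return "entrada"
--     return "básico"
-- ===== SOURCE B (Python) =====
-- LABELS = ["básico", "entrada", "intermediário", "alto", "entusiasta"]
--
-- KEYWORD_RANKS = [
--     (1, ("i3", "ryzen 3")),
--     (2, ("i5", "ryzen 5", "ultra 5")),
--     (3, ("i7", "ryzen 7", "ultra 7")),
--     (4, ("i9", "ryzen 9", "ultra 9")),
-- ]
--
--
-- def estimate_cpu_tier(cpu_name, threads):
--     lower = cpu_name.lower()
--     t = threads or 0
--     name_rank = 0
--     for rank, keys in KEYWORD_RANKS: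
--         if any(k in lower for k in keys):
--             name_rank = rank
--     thread_rank = sum(t >= m for m in (4, 8, 12, 20))
--     return LABELS[max(name_rank, thread_rank)]
-- ===== Notes on version B (the rewrite author's own statement) =====
-- stated objective: alternative
-- what changed: Instead of A's ordered first-match cascade of four combined keyword-or-threads branches, B computes two independent numeric ranks (the best keyword rank found by scanning a rank table, and a threads rank obtained by counting how many thresholds are passed), takes their max and indexes a label list.
import Mathlib
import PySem

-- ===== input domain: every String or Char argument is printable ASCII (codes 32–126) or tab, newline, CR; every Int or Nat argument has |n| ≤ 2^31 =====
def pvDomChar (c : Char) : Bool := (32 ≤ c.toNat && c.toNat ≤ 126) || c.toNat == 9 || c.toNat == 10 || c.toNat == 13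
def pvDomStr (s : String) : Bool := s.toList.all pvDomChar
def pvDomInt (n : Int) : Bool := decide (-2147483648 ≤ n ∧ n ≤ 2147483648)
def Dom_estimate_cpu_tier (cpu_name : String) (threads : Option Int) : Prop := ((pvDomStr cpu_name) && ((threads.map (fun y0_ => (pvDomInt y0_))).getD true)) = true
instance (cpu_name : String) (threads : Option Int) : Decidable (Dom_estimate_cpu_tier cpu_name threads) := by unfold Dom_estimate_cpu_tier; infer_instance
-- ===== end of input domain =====

-- B replaces A's first-match if cascade by two independent numeric ranks (best keyword rank from a scan, count of thread thresholds passed) combined with max and used to index a label list (alternative decomposition, same cost).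

-- ===== PORT A =====
def estimate_cpu_tier (cpu_name : String) (threads : Option Int) : String :=
  let lower := PySem.Str.lower cpu_name
  let t : Int := threads.getD 0   -- 'threads or 0': None ↦ 0, and 0 ↦ 0 (same value)
  if (["i9", "ryzen 9", "ultra 9"].any (fun k => PySem.Str.isIn k lower)) || 20 ≤ t then "entusiasta"
  else if (["i7", "ryzen 7", "ultra 7"].any (fun k => PySem.Str.isIn k lower)) || 12 ≤ t then "alto"
  else if (["i5", "ryzen 5", "ultra 5"].any (fun k => PySem.Str.isIn k lower)) || 8 ≤ t then "intermediário"
  else if (["i3", "ryzen 3"].any (fun k => PySem.Str.isIn k lower)) || 4 ≤ t then "entrada"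
  else "básico"

-- ===== PORT B =====
def pvLabels : List String := ["básico", "entrada", "intermediário", "alto", "entusiasta"]

def pvKeywordRanks : List (Int × List String) :=
  [ (1, ["i3", "ryzen 3"]),
    (2, ["i5", "ryzen 5", "ultra 5"]),
    (3, ["i7", "ryzen 7", "ultra 7"]),
    (4, ["i9", "ryzen 9", "ultra 9"]) ]

def estimate_cpu_tier_alt (cpu_name : String) (threads : Option Int) : String :=
  let lower := PySem.Str.lower cpu_name
  let t : Int := threads.getD 0
  let name_rank : Int :=
    pvKeywordRanks.foldl
      (fun acc rk => if rk.2.any (fun k => PySem.Str.isIn k lower) then rk.1 else acc) 0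
  -- sum(t >= m for m in (4, 8, 12, 20)): Python bools count as 0/1
  let thread_rank : Int :=
    ([4, 8, 12, 20] : List Int).foldl (fun acc m => acc + (if m ≤ t then 1 else 0)) 0
  (PySem.List.pyGet? pvLabels (max name_rank thread_rank)).getD ""

-- ===== PRECONDITION & SPEC =====
def Spec_estimate_cpu_tier (cpu_name : String) (threads : Option Int) (out : String) : Prop := out = estimate_cpu_tier_alt cpu_name threads
instance (cpu_name : String) (threads : Option Int) (out : String) : Decidable (Spec_estimate_cpu_tier cpu_name threads out) := by unfold Spec_estimate_cpu_tier; infer_instance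

-- ===== CLAIM (what is proved, stated in full; the proofs are below) =====
def Claim_equal_estimate_cpu_tier : Prop := ∀ (cpu_name : String) (threads : Option Int), Dom_estimate_cpu_tier cpu_name threads → Spec_estimate_cpu_tier cpu_name threads (estimate_cpu_tier cpu_name threads)

-- ===== LEMMAS AND PROOFS =====

-- Core lemma: with the four keyword tests abstracted as Booleans, A's cascade equals
-- B's max-of-ranks label lookup.
set_option maxHeartbeats 1000000 in
theorem pvKey (b3 b5 b7 b9 : Bool) (t : Int) :
  (if b9 || decide ((20:Int) ≤ t) then "entusiasta"
   else if b7 || decide ((12:Int) ≤ t) then "alto"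
   else if b5 || decide ((8:Int) ≤ t) then "intermediário"
   else if b3 || decide ((4:Int) ≤ t) then "entrada" else "básico")
  = (PySem.List.pyGet? pvLabels
      (max (if b9 then 4 else if b7 then 3 else if b5 then 2 else if b3 then 1 else 0)
           ((((0 + (if (4:Int) ≤ t then 1 else 0)) + (if (8:Int) ≤ t then 1 else 0))
              + (if (12:Int) ≤ t then 1 else 0)) + (if (20:Int) ≤ t then 1 else 0)))).getD "" := by
  split_ifs <;> simp_all [PySem.List.pyGet?, PySem.List.pyIdx?, pvLabels] <;> omega

-- ===== VERDICT (by name: the statement is the Claim_ definition above) =====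
theorem estimate_cpu_tier_spec : Claim_equal_estimate_cpu_tier := by
  intro cpu_name threads _
  unfold Spec_estimate_cpu_tier estimate_cpu_tier estimate_cpu_tier_alt pvKeywordRanks
  simp only [List.foldl, List.any_cons, List.any_nil, Bool.or_false]
  exact pvKey _ _ _ _ _
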